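-- pv_equiv track=rewrite | github.com/systems-nuts/zsim-ndp | misc/patchRoot/gen_hetero_patch_root.py | get_mask
-- ===== SOURCE A (Python) =====
-- def get_mask(vals, size):
--     ''' Generate a bitmask in the format as 00110010,11001101, i.e., group of 32 bit. '''
--     cur = 0
--     l = []
--     for i in range(size):
--         if i in vals:
--             cur |= 1 << (i % 32)
--         if (i + 1) % 32 == 0 or i == size - 1:
--             l.append(cur)
--             cur = 0
--     l.reverse()
--     return ','.join(['{:08x}'.format(n) for n in l])
-- ===== SOURCE B (Python) =====
-- def get_mask(vals, size):
--     ''' Same 32-bit-grouped hex bitmask, built from one big integer instead of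
--         scanning vals for every index. '''
--     big = 0
--     for v in vals:
--         if 0 <= v < size:
--             big |= 1 << v
--     num_groups = max((size + 31) // 32, 0)
--     words = [(big >> (32 * g)) & 0xFFFFFFFF for g in range(num_groups)]
--     return ','.join('{:08x}'.format(w) for w in reversed(words))
-- ===== Notes on version B (the rewrite author's own statement) =====
-- stated objective: faster
-- what changed: Instead of testing 'i in vals' for every i in range(size) and flushing a running 32-bit accumulator at block boundaries, B makes one pass over vals to set bits in a single big integer and then slices that integer into 32-bit words by shifting and masking.
import Mathlib
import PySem

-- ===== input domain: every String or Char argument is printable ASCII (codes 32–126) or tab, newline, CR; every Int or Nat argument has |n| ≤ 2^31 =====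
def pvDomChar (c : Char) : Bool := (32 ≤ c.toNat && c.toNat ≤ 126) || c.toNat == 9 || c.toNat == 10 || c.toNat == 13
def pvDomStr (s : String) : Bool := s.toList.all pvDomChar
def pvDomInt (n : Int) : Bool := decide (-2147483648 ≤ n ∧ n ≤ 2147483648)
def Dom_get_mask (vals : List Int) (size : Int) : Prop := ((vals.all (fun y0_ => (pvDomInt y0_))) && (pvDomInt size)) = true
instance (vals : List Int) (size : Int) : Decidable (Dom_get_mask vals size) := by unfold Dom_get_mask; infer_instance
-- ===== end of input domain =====

-- B builds the mask as one big integer indexed by vals and then slices it into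
-- 32-bit words, instead of scanning vals for every index in range(size).

-- shared helper: '{:08x}'.format(n) — exact for 0 ≤ n < 2^32, the only values
-- either program formats (A's cur and B's words are 32-bit nonnegative).
def hexDigit (n : Nat) : Char := Char.ofNat (if n < 10 then 48 + n else 87 + n)
def hex8 (n : Int) : String := String.ofList ((List.range 8).map (fun k => hexDigit ((n.toNat >>> (4 * (7 - k))) % 16)))

-- ===== PORT A =====
-- the loop 'for i in range(size)' with state (cur, l); 1 << (i % 32) uses a
-- Nat shift amount via .toNat, exact since i % 32 ≥ 0.
def get_mask (vals : List Int) (size : Int) : String :=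
  let st := (PySem.List.pyRange 0 size 1).foldl
    (fun (st : Int × List Int) i =>
      let cur := if i ∈ vals then PySem.Int.bor st.1 ((1 : Int) <<< (PySem.Int.mod i 32).toNat) else st.1
      if PySem.Int.mod (i + 1) 32 = 0 ∨ i = size - 1 then (0, st.2 ++ [cur]) else (cur, st.2))
    ((0 : Int), ([] : List Int))
  PySem.Str.join "," ((st.2.reverse).map hex8)

-- ===== PORT B =====
-- 1 << v and big >> (32*g) use Nat shift amounts via .toNat, exact since
-- 0 ≤ v and 0 ≤ g on the branches where they are taken.
def get_mask_alt (vals : List Int) (size : Int) : String :=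
  let big : Int := vals.foldl (fun b v => if 0 ≤ v ∧ v < size then PySem.Int.bor b ((1 : Int) <<< v.toNat) else b) 0
  let numGroups : Int := max (PySem.Int.floordiv (size + 31) 32) 0
  let words : List Int := (PySem.List.pyRange 0 numGroups 1).map
    (fun g => PySem.Int.band (big >>> (32 * g).toNat) 0xFFFFFFFF)
  PySem.Str.join "," ((words.reverse).map hex8)

-- ===== PRECONDITION & SPEC =====
def Spec_get_mask (vals : List Int) (size : Int) (out : String) : Prop := out = get_mask_alt vals size
instance (vals : List Int) (size : Int) (out : String) : Decidable (Spec_get_mask vals size out) := by unfold Spec_get_mask; infer_instance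

-- ===== CLAIM (what is proved, stated in full; the proofs are below) =====
def Claim_equal_get_mask : Prop := ∀ (vals : List Int) (size : Int), Dom_get_mask vals size → Spec_get_mask vals size (get_mask vals size)

-- ===== LEMMAS AND PROOFS =====

-- proof-side copy of A's loop body
def stepA (vals : List Int) (size : Int) (st : Int × List Int) (i : Int) : Int × List Int :=
  let cur := if i ∈ vals then PySem.Int.bor st.1 ((1 : Int) <<< (PySem.Int.mod i 32).toNat) else st.1
  if PySem.Int.mod (i + 1) 32 = 0 ∨ i = size - 1 then (0, st.2 ++ [cur]) else (cur, st.2)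

def accN (vals : List Int) (c : Nat) (a b : Int) : Nat :=
  (PySem.List.pyRange a b 1).foldl
    (fun c i => if i ∈ vals then c ||| ((1 : Nat) <<< (PySem.Int.mod i 32).toNat) else c) c

def bigN (vals : List Int) (size : Int) : Nat :=
  vals.foldl (fun b v => if 0 ≤ v ∧ v < size then b ||| ((1 : Nat) <<< v.toNat) else b) 0

lemma get_mask_eq (vals : List Int) (size : Int) :
    get_mask vals size =
      PySem.Str.join ","
        ((((PySem.List.pyRange 0 size 1).foldl (stepA vals size) ((0 : Int), ([] : List Int))).2.reverse).map hex8) := rfl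

lemma one_shl_cast (k : Nat) : ((1 : Int) <<< k) = (((1 <<< k : Nat)) : Int) := by
  simp [Int.shiftLeft_eq, Nat.shiftLeft_eq]

lemma bor_cast_step (c k : Nat) :
    PySem.Int.bor (c : Int) ((1 : Int) <<< k) = ((c ||| (1 <<< k) : Nat) : Int) := by
  rw [one_shl_cast, PySem.Int.bor_natCast]

lemma accN_nil (vals : List Int) (c : Nat) (a b : Int) (h : b ≤ a) : accN vals c a b = c := by
  simp [accN, PySem.List.pyRange_one_eq_nil h]

lemma accN_cons (vals : List Int) (c : Nat) (a b : Int) (h : a < b) :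
    accN vals c a b
      = accN vals (if a ∈ vals then c ||| ((1 : Nat) <<< (PySem.Int.mod a 32).toNat) else c) (a + 1) b := by
  simp [accN, PySem.List.pyRange_one_cons h]

lemma accN_snoc (vals : List Int) (c : Nat) (a b : Int) (h : a ≤ b) :
    accN vals c a (b + 1)
      = (if b ∈ vals then (accN vals c a b) ||| ((1 : Nat) <<< (PySem.Int.mod b 32).toNat) else accN vals c a b) := by
  simp [accN, PySem.List.pyRange_one_succ_right h, List.foldl_append]

-- a run of loop iterations in which the flush condition never fires
lemma accum_run (vals : List Int) (size : Int) :
    ∀ (k : Nat) (a b : Int) (c : Nat) (l : List Int), (b - a).toNat = k →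
    (∀ i, a ≤ i → i < b → ¬(PySem.Int.mod (i + 1) 32 = 0 ∨ i = size - 1)) →
    (PySem.List.pyRange a b 1).foldl (stepA vals size) ((c : Int), l)
      = (((accN vals c a b : Nat) : Int), l) := by
  intro k
  induction k with
  | zero =>
    intro a b c l hk h
    have hba : b ≤ a := by omega
    simp [PySem.List.pyRange_one_eq_nil hba, accN_nil vals c a b hba]
  | succ k ih =>
    intro a b c l hk h
    have hab : a < b := by omega
    rw [PySem.List.pyRange_one_cons hab, List.foldl_cons]
    have hnf := h a le_rfl hab
    have hstep : stepA vals size ((c : Int), l) a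
        = (((if a ∈ vals then c ||| ((1 : Nat) <<< (PySem.Int.mod a 32).toNat) else c : Nat) : Int), l) := by
      simp only [stepA]
      rw [if_neg hnf]
      by_cases hm : a ∈ vals
      · rw [if_pos hm, if_pos hm, bor_cast_step]
      · rw [if_neg hm, if_neg hm]
    rw [hstep, ih (a + 1) b _ l (by omega) (fun i h1 h2 => h i (by omega) h2),
        accN_cons vals c a b hab]

-- a run ending at a flushing index f
lemma flush_run (vals : List Int) (size : Int) (a f : Int) (c : Nat) (l : List Int)
    (haf : a ≤ f)
    (hfl : PySem.Int.mod (f + 1) 32 = 0 ∨ f = size - 1)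
    (h : ∀ i, a ≤ i → i < f → ¬(PySem.Int.mod (i + 1) 32 = 0 ∨ i = size - 1)) :
    (PySem.List.pyRange a (f + 1) 1).foldl (stepA vals size) ((c : Int), l)
      = ((0 : Int), l ++ [((accN vals c a (f + 1) : Nat) : Int)]) := by
  rw [PySem.List.pyRange_one_succ_right haf, List.foldl_append,
      accum_run vals size (f - a).toNat a f c l rfl h]
  simp only [List.foldl_cons, List.foldl_nil, stepA]
  rw [accN_snoc vals c a f haf]
  by_cases hm : f ∈ vals
  · rw [if_pos hm, if_pos hm, bor_cast_step, if_pos hfl]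
  · rw [if_neg hm, if_neg hm, if_pos hfl]

-- all complete 32-wide blocks
lemma full_blocks (vals : List Int) (size : Int) :
    ∀ (k : Nat), (32 * k : Int) < size →
    (PySem.List.pyRange 0 (32 * k) 1).foldl (stepA vals size) ((0 : Int), ([] : List Int))
      = ((0 : Int), (List.range k).map
          (fun (g : Nat) => ((accN vals 0 (32 * (g : Int)) (32 * (g : Int) + 32) : Nat) : Int))) := by
  intro k
  induction k with
  | zero =>
    intro _
    rw [PySem.List.pyRange_one_eq_nil (by norm_num)]
    simp
  | succ k ih =>
    intro hk
    rw [show ((32 * (k + 1 : Nat) : Int)) = 32 * (k : Int) + 32 by push_cast; ring] at hk ⊢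
    have h1 : (0 : Int) ≤ 32 * k := by positivity
    rw [PySem.List.pyRange_one_append 0 (32 * (k : Int)) (32 * (k : Int) + 32) h1 (by omega),
        List.foldl_append, ih (by omega)]
    have hfr := flush_run vals size (32 * (k : Int)) (32 * (k : Int) + 31) 0
        ((List.range k).map (fun (g : Nat) => ((accN vals 0 (32 * (g : Int)) (32 * (g : Int) + 32) : Nat) : Int)))
        (by omega)
        (Or.inl (by rw [PySem.Int.mod_eq_zero_iff_dvd]; exact ⟨(k : Int) + 1, by ring⟩))
        (by
          intro i hi1 hi2 hor
          rcases hor with hmod | hlast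
          · rw [PySem.Int.mod_eq_zero_iff_dvd] at hmod
            omega
          · omega)
    rw [Nat.cast_zero] at hfr
    rw [show (32 * (k : Int) + 32) = (32 * (k : Int) + 31) + 1 by ring, hfr,
        List.range_succ, List.map_append, List.map_cons, List.map_nil,
        show (32 * (k : Int) + 31) + 1 = 32 * (k : Int) + 32 by ring]

-- characterization of A's word list (size > 0)
lemma A_words (vals : List Int) (size : Int) (hpos : 0 < size) :
    ((PySem.List.pyRange 0 size 1).foldl (stepA vals size) ((0 : Int), ([] : List Int))).2
      = (List.range ((size.toNat + 31) / 32)).map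
          (fun (g : Nat) => ((accN vals 0 (32 * (g : Int)) (min (32 * (g : Int) + 32) size) : Nat) : Int)) := by
  obtain ⟨G', hG'⟩ : ∃ G', (size.toNat + 31) / 32 = G' + 1 := ⟨(size.toNat + 31) / 32 - 1, by omega⟩
  rw [hG']
  have hM : (32 * (G' : Int)) < size := by
    have : 32 * G' < size.toNat := by omega
    omega
  have hMle : (32 * (G' : Int)) ≤ size := le_of_lt hM
  have hsize32 : size ≤ 32 * (G' : Int) + 32 := by
    have : size.toNat ≤ 32 * G' + 32 := by omega
    omega
  rw [PySem.List.pyRange_one_append 0 (32 * (G' : Int)) size (by positivity) hMle,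
      List.foldl_append, full_blocks vals size G' hM]
  have hfr := flush_run vals size (32 * (G' : Int)) (size - 1) 0
      ((List.range G').map (fun (g : Nat) => ((accN vals 0 (32 * (g : Int)) (32 * (g : Int) + 32) : Nat) : Int)))
      (by omega) (Or.inr rfl)
      (by
        intro i hi1 hi2 hor
        rcases hor with hmod | hlast
        · rw [PySem.Int.mod_eq_zero_iff_dvd] at hmod
          omega
        · omega)
  rw [Nat.cast_zero, show size - 1 + 1 = size by ring] at hfr
  rw [hfr, List.range_succ, List.map_append, List.map_cons, List.map_nil]
  dsimp only
  congr 1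
  · apply List.map_congr_left
    intro g hg
    have hglt : g < G' := List.mem_range.mp hg
    have : min (32 * (g : Int) + 32) size = 32 * (g : Int) + 32 := by omega
    rw [this]
  · have : min (32 * (G' : Int) + 32) size = size := by omega
    rw [this]

-- B's big integer, cast down to Nat
lemma big_cast_aux (size : Int) :
    ∀ (l : List Int) (b : Nat),
    l.foldl (fun b v => if 0 ≤ v ∧ v < size then PySem.Int.bor b ((1 : Int) <<< v.toNat) else b) ((b : Nat) : Int)
      = ((l.foldl (fun b v => if 0 ≤ v ∧ v < size then b ||| ((1 : Nat) <<< v.toNat) else b) b : Nat) : Int) := by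
  intro l
  induction l with
  | nil => intro b; rfl
  | cons v tl ih =>
    intro b
    simp only [List.foldl_cons]
    by_cases hv : 0 ≤ v ∧ v < size
    · rw [if_pos hv, if_pos hv, bor_cast_step, ih]
    · rw [if_neg hv, if_neg hv, ih]

lemma big_cast (vals : List Int) (size : Int) :
    vals.foldl (fun b v => if 0 ≤ v ∧ v < size then PySem.Int.bor b ((1 : Int) <<< v.toNat) else b) 0
      = ((bigN vals size : Nat) : Int) := by
  have := big_cast_aux size vals 0
  rw [Nat.cast_zero] at this
  exact this

-- bit characterizations
lemma testBit_accN (vals : List Int) (t : Nat) :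
    ∀ (k : Nat) (a b : Int) (c : Nat), (b - a).toNat = k →
    (accN vals c a b).testBit t
      = (c.testBit t || (PySem.List.pyRange a b 1).any
          (fun i => decide (i ∈ vals) && decide ((PySem.Int.mod i 32).toNat = t))) := by
  intro k
  induction k with
  | zero =>
    intro a b c hk
    have hba : b ≤ a := by omega
    simp [accN_nil vals c a b hba, PySem.List.pyRange_one_eq_nil hba]
  | succ k ih =>
    intro a b c hk
    have hab : a < b := by omega
    rw [accN_cons vals c a b hab, ih (a + 1) b _ (by omega),
        PySem.List.pyRange_one_cons hab, List.any_cons]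
    by_cases hm : a ∈ vals
    · rw [if_pos hm]
      simp [Nat.testBit_or, Nat.one_shiftLeft, Nat.testBit_two_pow, hm, Bool.or_assoc]
    · rw [if_neg hm]
      simp [hm]

lemma testBit_bigN_aux (size : Int) (t : Nat) :
    ∀ (l : List Int) (b : Nat),
    (l.foldl (fun b v => if 0 ≤ v ∧ v < size then b ||| ((1 : Nat) <<< v.toNat) else b) b).testBit t
      = (b.testBit t || l.any (fun v => decide (0 ≤ v ∧ v < size) && decide (v.toNat = t))) := by
  intro l
  induction l with
  | nil => intro b; simp
  | cons v tl ih =>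
    intro b
    simp only [List.foldl_cons, List.any_cons]
    rw [ih]
    by_cases hv : 0 ≤ v ∧ v < size
    · simp [hv, Nat.testBit_or, Nat.one_shiftLeft, Nat.testBit_two_pow, Bool.or_assoc,
        eq_comm (a := v.toNat)]
    · simp [hv]

lemma testBit_bigN (vals : List Int) (size : Int) (t : Nat) :
    (bigN vals size).testBit t
      = vals.any (fun v => decide (0 ≤ v ∧ v < size) && decide (v.toNat = t)) := by
  rw [bigN, testBit_bigN_aux]
  simp

-- per-group equality of A's word and B's word
lemma word_eq (vals : List Int) (size : Int) (g : Nat) (hg : (32 * (g : Int)) < size) :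
    ((accN vals 0 (32 * (g : Int)) (min (32 * (g : Int) + 32) size) : Nat) : Int)
      = PySem.Int.band (((bigN vals size : Nat) : Int) >>> (((32 * (g : Int)).toNat : Nat) : Int)) 0xFFFFFFFF := by
  rw [show (((32 * (g : Int)).toNat : Nat) : Int) = ((32 * g : Nat) : Int) by omega, Int.shiftRight_natCast,
      show (0xFFFFFFFF : Int) = ((0xFFFFFFFF : Nat) : Int) by norm_num,
      PySem.Int.band_natCast, Nat.cast_inj]
  apply Nat.eq_of_testBit_eq
  intro t
  rw [testBit_accN vals t _ _ _ _ rfl, Nat.testBit_and, Nat.testBit_shiftRight, testBit_bigN,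
      show (0xFFFFFFFF : Nat) = 2 ^ 32 - 1 by norm_num, Nat.testBit_two_pow_sub_one]
  rw [Bool.eq_iff_iff]
  simp only [Nat.zero_testBit, Bool.false_or, List.any_eq_true, PySem.List.mem_pyRange_one,
    Bool.and_eq_true, decide_eq_true_eq]
  constructor
  · rintro ⟨i, ⟨hi1, hi2⟩, hmem, hmod⟩
    rw [PySem.Int.mod_eq_emod_of_pos (by norm_num)] at hmod
    refine ⟨⟨i, hmem, ⟨by omega, by omega⟩, by omega⟩, by omega⟩
  · rintro ⟨⟨v, hmem, ⟨hv0, hvs⟩, hvt⟩, ht32⟩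
    refine ⟨v, ⟨by omega, by omega⟩, hmem, ?_⟩
    rw [PySem.Int.mod_eq_emod_of_pos (by norm_num)]
    omega

-- ===== VERDICT (by name: the statement is the Claim_ definition above) =====
theorem get_mask_spec : Claim_equal_get_mask := by
  intro vals size _
  unfold Spec_get_mask
  rw [get_mask_eq]
  simp only [get_mask_alt]
  rw [big_cast]
  by_cases hpos : 0 < size
  · rw [A_words vals size hpos]
    have hng : max (PySem.Int.floordiv (size + 31) 32) 0 = (((size.toNat + 31) / 32 : Nat) : Int) := by
      rw [show size + 31 = ((size.toNat + 31 : Nat) : Int) by omega,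
          show (32 : Int) = ((32 : Nat) : Int) by norm_num, PySem.Int.floordiv_natCast]
      omega
    rw [hng, PySem.List.pyRange_zero_nat, List.map_map]
    have hmaps : (List.range ((size.toNat + 31) / 32)).map
          (fun (g : Nat) => ((accN vals 0 (32 * (g : Int)) (min (32 * (g : Int) + 32) size) : Nat) : Int))
        = (List.range ((size.toNat + 31) / 32)).map
            ((fun g => PySem.Int.band (((bigN vals size : Nat) : Int) >>> (((32 * g).toNat : Nat) : Int)) 0xFFFFFFFF)
              ∘ (fun (k : Nat) => (k : Int))) := by
      apply List.map_congr_left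
      intro g hg
      have hglt : g < (size.toNat + 31) / 32 := List.mem_range.mp hg
      have h32 : (32 * (g : Int)) < size := by
        have : 32 * g < size.toNat := by omega
        omega
      simp only [Function.comp_apply]
      exact word_eq vals size g h32
    rw [hmaps]
  · have hA : PySem.List.pyRange 0 size 1 = [] := PySem.List.pyRange_one_eq_nil (by omega)
    have hng : max (PySem.Int.floordiv (size + 31) 32) 0 = 0 := by
      have : PySem.Int.floordiv (size + 31) 32 ≤ 0 := by
        rw [PySem.Int.floordiv_eq_ediv_of_pos (by norm_num)]
        omega
      omega
    rw [hA, hng, PySem.List.pyRange_one_eq_nil (by norm_num)]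
    simp

-- ===== end =====
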